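-- pv_equiv track=rewrite | github.com/YellowShinwon/YellowShinwon_Home | brute_force/two.py | delete_even
-- ===== SOURCE A (Python) =====
-- def delete_even(number_permutations):
--     odd_list = []
--     two = 0
--     for number in number_permutations:
--         number = int(number)
--         if number == 1:
--             continue
--         if number == 2:
--             two = 1
--             continue
--         if number % 2 == 1:
--             odd_list.append(number)
--     return set(odd_list), two
-- ===== SOURCE B (Python) =====
-- def delete_even(number_permutations):
--     # Divide and conquer: solve halves independently, combine by concatenation
--     # of odd lists and max of the 2-flags; set() at the end dedups.
--     def solve(items):
--         if len(items) == 0: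
--             return [], 0
--         if len(items) == 1:
--             n = int(items[0])
--             if n == 2:
--                 return [], 1
--             if n % 2 == 1 and n != 1:
--                 return [n], 0
--             return [], 0
--         mid = len(items) // 2
--         lodds, ltwo = solve(items[:mid])
--         rodds, rtwo = solve(items[mid:])
--         return lodds + rodds, max(ltwo, rtwo)
--
--     odds, two = solve(number_permutations)
--     return set(odds), two
-- ===== Notes on version B (the rewrite author's own statement) =====
-- stated objective: alternative
-- what changed: Replaces A's single left-to-right guard loop with mutable accumulators by a divide-and-conquer recursion: split the list in halves, solve each half independently, combine by list concatenation and max of the 2-flags, dedup once with set() at the end.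
import Mathlib
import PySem

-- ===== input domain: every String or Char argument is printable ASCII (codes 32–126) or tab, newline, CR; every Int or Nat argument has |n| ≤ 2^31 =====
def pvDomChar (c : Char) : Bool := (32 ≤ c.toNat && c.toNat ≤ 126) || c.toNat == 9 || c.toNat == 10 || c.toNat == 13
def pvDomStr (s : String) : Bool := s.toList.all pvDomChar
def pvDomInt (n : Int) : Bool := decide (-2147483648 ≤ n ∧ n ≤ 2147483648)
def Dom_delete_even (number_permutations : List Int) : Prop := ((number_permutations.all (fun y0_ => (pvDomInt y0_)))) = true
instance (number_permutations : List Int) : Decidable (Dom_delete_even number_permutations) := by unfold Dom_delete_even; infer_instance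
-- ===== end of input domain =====

-- ===== PORT A =====
-- B solves the task by divide-and-conquer over halves instead of A's single guarded loop; objective: alternative.
def delete_even (number_permutations : List Int) : List Int × Int :=
  let s := number_permutations.foldl (fun (acc : List Int × Int) number =>
    if number == 1 then acc
    else if number == 2 then (acc.1, 1)
    else if PySem.Int.mod number 2 == 1 then (acc.1 ++ [number], acc.2)
    else acc) ([], 0)
  (PySem.Set.ofList s.1, s.2)

-- ===== PORT B =====
-- recursive helper `solve` of Source B; `len(items) // 2` on the nonnegative length equals Nat division
def solveB : List Int → List Int × Int
  | [] => ([], 0)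
  | [n] =>
    if n == 2 then ([], 1)
    else if PySem.Int.mod n 2 == 1 && n != 1 then ([n], 0)
    else ([], 0)
  | a :: b :: rest =>
    let l := a :: b :: rest
    let mid := l.length / 2
    let lres := solveB (l.take mid)
    let rres := solveB (l.drop mid)
    (lres.1 ++ rres.1, max lres.2 rres.2)
termination_by l => l.length
decreasing_by
  · simp; omega
  · simp; omega

def delete_even_alt (number_permutations : List Int) : List Int × Int :=
  let s := solveB number_permutations
  (PySem.Set.ofList s.1, s.2)

-- ===== PRECONDITION & SPEC =====
def Spec_delete_even (number_permutations : List Int) (out : List Int × Int) : Prop := out = delete_even_alt number_permutations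
instance (number_permutations : List Int) (out : List Int × Int) : Decidable (Spec_delete_even number_permutations out) := by unfold Spec_delete_even; infer_instance

-- ===== CLAIM (what is proved, stated in full; the proofs are below) =====
def Claim_equal_delete_even : Prop := ∀ (number_permutations : List Int), Dom_delete_even number_permutations → Spec_delete_even number_permutations (delete_even number_permutations)

-- ===== LEMMAS AND PROOFS =====

-- characterisation of Source B's divide-and-conquer helper: it computes the in-order
-- filtered list of odds other than 1, and the flag 'does the list contain 2'
theorem solveB_eq (l : List Int) :
    solveB l = (l.filter (fun n => PySem.Int.mod n 2 == 1 && n != 1),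
                if l.contains 2 then 1 else 0) := by
  fun_induction solveB l with
  | case1 => simp
  | case2 n h => simp_all [List.filter, PySem.Int.mod]
  | case3 n h hm =>
      have h2 : ¬(2:Int) = n := fun e => h (by simp [e.symm])
      simp only [List.filter_cons, List.filter_nil, hm]
      simp [h2]
  | case4 n h hm =>
      have h2 : ¬(2:Int) = n := fun e => h (by simp [e.symm])
      have hm' : (PySem.Int.mod n 2 == 1 && n != 1) = false := by
        exact Bool.eq_false_iff.mpr hm
      simp only [List.filter_cons, List.filter_nil, hm']
      simp [h2]
  | case5 a b rest x y lres rres ih1 ih2 =>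
      show ((solveB (List.take y x)).1 ++ (solveB (List.drop y x)).1,
            max (solveB (List.take y x)).2 (solveB (List.drop y x)).2) = _
      have hsplit : List.take y x ++ List.drop y x = a :: b :: rest := by
        rw [List.take_append_drop]
      rw [ih1, ih2, ← hsplit, List.filter_append]
      have hiff : (2 ∈ x) ↔ 2 ∈ List.take y x ∨ 2 ∈ List.drop y x := by
        conv_lhs => rw [show x = List.take y x ++ List.drop y x from hsplit.symm]
        exact List.mem_append
      by_cases hL : 2 ∈ List.take y x <;> by_cases hR : 2 ∈ List.drop y x <;>
        simp [hL, hR, hiff]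

-- A's loop computes the same filtered list and 2-flag
theorem delete_even_loop (l : List Int) (acc : List Int × Int) :
    l.foldl (fun (acc : List Int × Int) number =>
      if number == 1 then acc
      else if number == 2 then (acc.1, 1)
      else if PySem.Int.mod number 2 == 1 then (acc.1 ++ [number], acc.2)
      else acc) acc
    = (acc.1 ++ l.filter (fun n => PySem.Int.mod n 2 == 1 && n != 1),
       if l.contains 2 then 1 else acc.2) := by
  induction l generalizing acc with
  | nil => simp
  | cons x xs ih =>
    rw [List.foldl_cons, ih]
    by_cases h1 : x = 1
    · subst h1; simp [PySem.Int.mod]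
    · by_cases h2 : x = 2
      · subst h2; simp [PySem.Int.mod]
      · have h2' : ¬(2 : Int) = x := fun h => h2 h.symm
        by_cases hm : x.fmod 2 = 1
        · simp [PySem.Int.mod, h1, h2, h2', hm, bne]
        · simp [PySem.Int.mod, h1, h2, h2', hm, bne]

-- ===== VERDICT (by name: the statement is the Claim_ definition above) =====
theorem delete_even_spec : Claim_equal_delete_even := by
  intro l _
  unfold Spec_delete_even delete_even delete_even_alt
  rw [delete_even_loop, solveB_eq]
  simp
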